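-- pv_equiv track=rewrite | github.com/aanhtran01/GenomeAssembler | genomeassembler.py | de_bruijn
-- ===== SOURCE A (Python) =====
-- def de_bruijn(k, patterns):
--         adjacency_db = {}
--         for p in patterns:
--             prefix = p[:k - 1]
--             suffix = p[1:]
--             adjacency_db.setdefault(prefix, []).append(suffix)
--             if suffix not in adjacency_db:
--                 adjacency_db[suffix] = []
--         return adjacency_db
--
-- k = 16
-- ===== SOURCE B (Python) =====
-- def de_bruijn(k, patterns):
--     # grouping approach: materialise the edge list once, then build the dict by
--     # comprehension: each node's row is a filter over the edge list (no dict mutation).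
--     edges = [(p[:k - 1], p[1:]) for p in patterns]
--     nodes = []
--     for pre, suf in edges:
--         if pre not in nodes:
--             nodes.append(pre)
--         if suf not in nodes:
--             nodes.append(suf)
--     return {n: [s for pr, s in edges if pr == n] for n in nodes}
-- ===== Notes on version B (the rewrite author's own statement) =====
-- stated objective: alternative
-- what changed: B never mutates a dict while scanning: it materialises the edge (prefix,suffix) list once, derives the node list from it, and builds each adjacency row independently as a filter of the edge list by its node (a grouping comprehension), instead of A's single pass that grows the dict with setdefault/append and a 'suffix not in dict' guard.
import Mathlib
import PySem

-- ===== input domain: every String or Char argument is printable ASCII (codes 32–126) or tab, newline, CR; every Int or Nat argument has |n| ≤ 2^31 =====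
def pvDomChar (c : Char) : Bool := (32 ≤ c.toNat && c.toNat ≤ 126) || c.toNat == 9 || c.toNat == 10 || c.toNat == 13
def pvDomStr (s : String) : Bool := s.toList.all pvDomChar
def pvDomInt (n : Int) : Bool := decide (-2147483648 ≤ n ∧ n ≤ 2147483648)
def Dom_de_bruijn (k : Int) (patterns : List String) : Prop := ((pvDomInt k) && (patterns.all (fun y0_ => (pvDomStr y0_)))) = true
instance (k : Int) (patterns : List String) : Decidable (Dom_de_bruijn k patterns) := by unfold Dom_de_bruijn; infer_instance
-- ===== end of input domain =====

-- B builds the dict by grouping: edge list materialised once, node list derived from it, each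
-- adjacency row an independent filter of the edge list — no dict mutation; same result, not faster.

-- ===== PORT A =====
-- A's 'adjacency_db.setdefault(prefix, []).append(suffix)' sets d[prefix] = d.get(prefix, []) + [suffix],
-- which is exactly PySem.Dict.modify prefix [] (· ++ [suffix]).
def de_bruijn (k : Int) (patterns : List String) : List (String × List String) :=
  (patterns.foldl (fun d p =>
      let pfx := PySem.Str.slice p none (some (k - 1))
      let sfx := PySem.Str.slice p (some 1) none
      let d1 := d.modify pfx [] (fun l => l ++ [sfx])
      if d1.contains sfx then d1 else d1.insert sfx []
    ) PySem.Dict.empty).items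

-- ===== PORT B =====
-- Source B: edges = [(p[:k-1], p[1:]) for p in patterns]; node list grown with 'not in'/append;
-- result = {n: [s for pr, s in edges if pr == n] for n in nodes} (dict comprehension = map).
def de_bruijn_alt (k : Int) (patterns : List String) : List (String × List String) :=
  let edges := patterns.map (fun p =>
      (PySem.Str.slice p none (some (k - 1)), PySem.Str.slice p (some 1) none))
  let nodes := edges.foldl (fun ns e =>
      let ns1 := if ns.contains e.1 then ns else ns ++ [e.1]
      if ns1.contains e.2 then ns1 else ns1 ++ [e.2]) []
  nodes.map (fun n => (n, (edges.filter (fun e => e.1 == n)).map (·.2)))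

-- ===== PRECONDITION & SPEC =====
def Spec_de_bruijn (k : Int) (patterns : List String) (out : List (String × List String)) : Prop := out = de_bruijn_alt k patterns
instance (k : Int) (patterns : List String) (out : List (String × List String)) : Decidable (Spec_de_bruijn k patterns out) := by unfold Spec_de_bruijn; infer_instance

-- ===== CLAIM (what is proved, stated in full; the proofs are below) =====
def Claim_equal_de_bruijn : Prop := ∀ (k : Int) (patterns : List String), Dom_de_bruijn k patterns → Spec_de_bruijn k patterns (de_bruijn k patterns)

-- ===== LEMMAS AND PROOFS =====

-- prefix / suffix of one pattern, the node list and the per-node suffix list of a pattern list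
def pvPre (k : Int) (p : String) : String := PySem.Str.slice p none (some (k - 1))
def pvSuf (p : String) : String := PySem.Str.slice p (some 1) none
def pvNodes (k : Int) (ps : List String) : List String :=
  PySem.List.dedup (ps.flatMap (fun p => [pvPre k p, pvSuf p]))
def pvSufs (k : Int) (ps : List String) (n : String) : List String :=
  ((ps.map (fun p => (pvPre k p, pvSuf p))).filter (fun q => q.1 == n)).map (·.2)

lemma pvNodes_nodup (k : Int) (ps : List String) : (pvNodes k ps).Nodup := by
  rw [pvNodes, PySem.List.dedup_eq_ofList]
  exact PySem.Set.nodup_ofList _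

lemma pvPre_mem_nodes (k : Int) {ps : List String} {p : String} (hp : p ∈ ps) :
    pvPre k p ∈ pvNodes k ps := by
  simp [pvNodes, PySem.List.dedup_eq_ofList, PySem.Set.mem_ofList]
  exact ⟨p, hp, Or.inl rfl⟩

lemma pvSufs_of_not_mem (k : Int) (ps : List String) {n : String}
    (hn : n ∉ pvNodes k ps) : pvSufs k ps n = [] := by
  unfold pvSufs
  have h : ((ps.map (fun p => (pvPre k p, pvSuf p))).filter (fun q => q.1 == n)) = [] := by
    rw [List.filter_eq_nil_iff]
    intro q hq
    rcases List.mem_map.mp hq with ⟨p, hp, rfl⟩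
    simp only [beq_iff_eq]
    intro h
    exact hn (h ▸ pvPre_mem_nodes k hp)
  rw [h]; rfl

lemma pvNodes_append_singleton (k : Int) (ps : List String) (p : String) :
    pvNodes k (ps ++ [p]) =
      PySem.Set.add (PySem.Set.add (pvNodes k ps) (pvPre k p)) (pvSuf p) := by
  unfold pvNodes
  rw [List.flatMap_append]
  simp only [List.flatMap_cons, List.flatMap_nil, List.append_nil]
  rw [PySem.List.dedup_eq_ofList, PySem.List.dedup_eq_ofList, PySem.Set.ofList_append]
  rw [PySem.Set.update_cons, PySem.Set.update_cons, PySem.Set.update_nil]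

lemma pvSufs_append_singleton (k : Int) (ps : List String) (p : String) (n : String) :
    pvSufs k (ps ++ [p]) n = pvSufs k ps n ++ (if pvPre k p = n then [pvSuf p] else []) := by
  unfold pvSufs
  rw [List.map_append, List.filter_append, List.map_append]
  simp only [List.map_cons, List.map_nil, List.filter_cons, List.filter_nil]
  by_cases h : pvPre k p = n <;> simp [h]

-- the dict built by A's loop body
def pvStep (k : Int) (d : PySem.Dict String (List String)) (p : String) :
    PySem.Dict String (List String) :=
  let pfx := PySem.Str.slice p none (some (k - 1))
  let sfx := PySem.Str.slice p (some 1) none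
  let d1 := d.modify pfx [] (fun l => l ++ [sfx])
  if d1.contains sfx then d1 else d1.insert sfx []

lemma de_bruijn_eq_fold (k : Int) (ps : List String) :
    de_bruijn k ps = (ps.foldl (pvStep k) PySem.Dict.empty).items := rfl

lemma pvFold_items (k : Int) (ps : List String) :
    (ps.foldl (pvStep k) PySem.Dict.empty).items
      = (pvNodes k ps).map (fun n => (n, pvSufs k ps n)) := by
  induction ps using List.reverseRecOn with
  | nil => rfl
  | append_singleton ps p ih =>
    have hnd : (pvNodes k ps).Nodup := pvNodes_nodup k ps
    set d := ps.foldl (pvStep k) PySem.Dict.empty with hd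
    have hkeys : d.keys = pvNodes k ps := by
      simp only [PySem.Dict.keys, ih, List.map_map]
      exact List.map_id _
    have hnodupk : d.keys.Nodup := hkeys ▸ hnd
    have hgetD : ∀ n, d.getD n [] = pvSufs k ps n := by
      intro n
      by_cases hmem : n ∈ pvNodes k ps
      · exact PySem.Dict.getD_of_mem_items d
          (by rw [ih]; exact List.mem_map.mpr ⟨n, hmem, rfl⟩) hnodupk []
      · rw [pvSufs_of_not_mem k ps hmem]
        apply PySem.Dict.getD_of_not_contains
        by_contra hc
        have : d.contains n = true := by
          cases h : d.contains n
          · exact absurd h hc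
          · rfl
        exact hmem (hkeys ▸ (PySem.Dict.contains_iff_mem_keys d n).mp this)
    set pfx := pvPre k p with hpfx
    set sfx := pvSuf p with hsfx
    set d1 := d.modify pfx [] (fun l => l ++ [sfx]) with hd1
    have hk1 : d1.keys = PySem.Set.add (pvNodes k ps) pfx := by
      rw [hd1, PySem.Dict.keys_modify]
      by_cases hc : d.contains pfx = true
      · rw [PySem.Dict.keys_insert_of_contains _ _ hc, hkeys,
          PySem.Set.add_of_mem (hkeys ▸ (PySem.Dict.contains_iff_mem_keys d pfx).mp hc)]
      · have hc' : d.contains pfx = false := by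
          cases h : d.contains pfx
          · rfl
          · exact absurd h hc
        rw [PySem.Dict.keys_insert_of_not_contains _ _ hc', hkeys,
          PySem.Set.add_of_not_mem]
        intro hm
        exact hc ((PySem.Dict.contains_iff_mem_keys d pfx).mpr (hkeys ▸ hm))
    have hg1 : ∀ n, d1.getD n [] = if n = pfx then d.getD pfx [] ++ [sfx] else d.getD n [] := by
      intro n
      exact PySem.Dict.getD_modify d pfx n [] (fun l => l ++ [sfx])
    have hstep : (ps ++ [p]).foldl (pvStep k) PySem.Dict.empty = pvStep k d p := by
      rw [List.foldl_append, List.foldl_cons, List.foldl_nil]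
    rw [hstep]
    have hstep2 : pvStep k d p = if d1.contains sfx then d1 else d1.insert sfx [] := rfl
    rw [hstep2]
    have hkadd : ∀ x, (PySem.Set.add (PySem.Set.add (pvNodes k ps) pfx) x).Nodup :=
      fun x => PySem.Set.nodup_add _ _ (PySem.Set.nodup_add _ _ hnd)
    by_cases hc2 : d1.contains sfx = true
    · -- suffix already a key: dict unchanged
      have hmem1 : sfx ∈ PySem.Set.add (pvNodes k ps) pfx := by
        rw [← hk1]; exact (PySem.Dict.contains_iff_mem_keys d1 sfx).mp hc2
      rw [if_pos hc2]
      have hk2 : d1.keys = PySem.Set.add (PySem.Set.add (pvNodes k ps) pfx) sfx := by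
        rw [hk1, PySem.Set.add_of_mem hmem1]
      have hnodup2 : d1.keys.Nodup := by rw [hk1]; exact PySem.Set.nodup_add _ _ hnd
      rw [PySem.Dict.items_eq_map_keys d1 hnodup2 [], hk2,
        pvNodes_append_singleton k ps p]
      apply List.map_congr_left
      intro n _
      rw [hg1 n, pvSufs_append_singleton k ps p n]
      by_cases hn : n = pfx
      · subst hn; rw [if_pos rfl, if_pos rfl, hgetD]
      · rw [if_neg hn, if_neg (fun h => hn h.symm), hgetD, List.append_nil]
    · have hc2' : d1.contains sfx = false := by
        cases h : d1.contains sfx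
        · rfl
        · exact absurd h hc2
      have hnmem1 : sfx ∉ PySem.Set.add (pvNodes k ps) pfx := by
        rw [← hk1]
        intro hm
        exact hc2 ((PySem.Dict.contains_iff_mem_keys d1 sfx).mpr hm)
      have hsn : sfx ∉ pvNodes k ps := fun h => hnmem1 (by rw [PySem.Set.mem_add]; exact Or.inl h)
      have hspfx : pfx ≠ sfx := fun h => hnmem1 (by rw [PySem.Set.mem_add]; exact Or.inr h.symm)
      rw [if_neg hc2]
      set d2 := d1.insert sfx ([] : List String) with hd2
      have hitems2 : d2.items = d1.items ++ [(sfx, [])] :=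
        PySem.Dict.items_insert_of_not_contains d1 _ hc2'
      have hk2 : d2.keys = PySem.Set.add (PySem.Set.add (pvNodes k ps) pfx) sfx := by
        have h : d2.keys = d1.keys ++ [sfx] := by
          simp only [PySem.Dict.keys, hitems2, List.map_append, List.map_cons, List.map_nil]
        rw [h, hk1, PySem.Set.add_of_not_mem hnmem1]
      have hnodup2 : d2.keys.Nodup := by rw [hk2]; exact hkadd sfx
      have hg2 : ∀ n, d2.getD n [] = if n = sfx then [] else d1.getD n [] := by
        intro n
        exact PySem.Dict.getD_insert d1 sfx n [] []
      rw [PySem.Dict.items_eq_map_keys d2 hnodup2 [], hk2,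
        pvNodes_append_singleton k ps p]
      apply List.map_congr_left
      intro n _
      rw [hg2 n, pvSufs_append_singleton k ps p n]
      by_cases hn2 : n = sfx
      · subst hn2
        rw [if_pos rfl, pvSufs_of_not_mem k ps hsn, if_neg hspfx]
        rfl
      · rw [if_neg hn2, hg1 n]
        by_cases hn : n = pfx
        · subst hn; rw [if_pos rfl, if_pos rfl, hgetD]
        · rw [if_neg hn, if_neg (fun h => hn h.symm), hgetD, List.append_nil]

-- characterisation of A's fold
lemma de_bruijn_items (k : Int) (ps : List String) :
    de_bruijn k ps = (pvNodes k ps).map (fun n => (n, pvSufs k ps n)) := by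
  rw [de_bruijn_eq_fold]; exact pvFold_items k ps

-- B's node fold is Set.ofList of the flattened prefix/suffix list
lemma pvAlt_nodes (k : Int) (ps : List String) :
    ((ps.map (fun p => (pvPre k p, pvSuf p))).foldl (fun ns e =>
        let ns1 := if ns.contains e.1 then ns else ns ++ [e.1]
        if ns1.contains e.2 then ns1 else ns1 ++ [e.2]) [])
      = pvNodes k ps := by
  rw [pvNodes, PySem.List.dedup_eq_ofList, PySem.Set.ofList_eq_foldl]
  have h : ∀ (ps : List String) (s : List String),
      ((ps.map (fun p => (pvPre k p, pvSuf p))).foldl (fun ns e =>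
          let ns1 := if ns.contains e.1 then ns else ns ++ [e.1]
          if ns1.contains e.2 then ns1 else ns1 ++ [e.2]) s)
        = (ps.flatMap (fun p => [pvPre k p, pvSuf p])).foldl PySem.Set.add s := by
    intro ps
    induction ps with
    | nil => intro s; rfl
    | cons p ps ih =>
      intro s
      simp only [List.map_cons, List.foldl_cons, List.flatMap_cons, List.foldl_append,
        List.foldl_cons, List.foldl_nil]
      rw [ih]
      rfl
  exact h ps []

-- characterisation of B
lemma de_bruijn_alt_items (k : Int) (ps : List String) :
    de_bruijn_alt k ps = (pvNodes k ps).map (fun n => (n, pvSufs k ps n)) := by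
  show ((ps.map (fun p => (pvPre k p, pvSuf p))).foldl (fun ns e =>
        let ns1 := if ns.contains e.1 then ns else ns ++ [e.1]
        if ns1.contains e.2 then ns1 else ns1 ++ [e.2]) []).map
      (fun n => (n, (((ps.map (fun p => (pvPre k p, pvSuf p))).filter
        (fun e => e.1 == n)).map (·.2)))) = _
  rw [pvAlt_nodes]
  rfl

-- ===== VERDICT (by name: the statement is the Claim_ definition above) =====
theorem de_bruijn_spec : Claim_equal_de_bruijn := by
  intro k patterns _
  unfold Spec_de_bruijn
  rw [de_bruijn_items, de_bruijn_alt_items]
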